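-- pv_equiv track=rewrite | github.com/vikash423q/Vocabmaster | backend/scripts/word_difficulty.py | difficulty_label
-- ===== SOURCE A (Python) =====
-- def difficulty_label(score):
--     score_buckets = [
--         (1, 10, "Ultra Easy"),
--         (2, 20, "Very Easy"),
--         (3, 30, "Easy"),
--         (4, 40, "Lower Medium"),
--         (5, 55, "Medium"),
--         (6, 70, "Upper Medium"),
--         (7, 80, "Hard"),
--         (8, 90, "Very Hard"),
--         (9, 100, "Rare / Obscure")
--     ]
--     for level, threshold, label in score_buckets:
--         if score < threshold:
--             return level, label
--     return 10, "Rare / Obscure"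
-- ===== SOURCE B (Python) =====
-- def difficulty_label(score):
--     thresholds = [10, 20, 30, 40, 55, 70, 80, 90, 100]
--     labels = ["Ultra Easy", "Very Easy", "Easy", "Lower Medium", "Medium",
--               "Upper Medium", "Hard", "Very Hard", "Rare / Obscure"]
--     # binary search: first index i with score < thresholds[i] (bisect_right)
--     lo, hi = 0, 9
--     while lo < hi:
--         mid = (lo + hi) // 2
--         if score < thresholds[mid]:
--             hi = mid
--         else:
--             lo = mid + 1
--     if lo < 9:
--         return lo + 1, labels[lo]
--     return 10, "Rare / Obscure"
-- ===== Notes on version B (the rewrite author's own statement) =====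
-- stated objective: alternative
-- what changed: Replaces A's linear scan over (level, threshold, label) triples with a hand-written binary search (bisect_right) over a sorted threshold list plus a parallel label list.
import Mathlib
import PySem

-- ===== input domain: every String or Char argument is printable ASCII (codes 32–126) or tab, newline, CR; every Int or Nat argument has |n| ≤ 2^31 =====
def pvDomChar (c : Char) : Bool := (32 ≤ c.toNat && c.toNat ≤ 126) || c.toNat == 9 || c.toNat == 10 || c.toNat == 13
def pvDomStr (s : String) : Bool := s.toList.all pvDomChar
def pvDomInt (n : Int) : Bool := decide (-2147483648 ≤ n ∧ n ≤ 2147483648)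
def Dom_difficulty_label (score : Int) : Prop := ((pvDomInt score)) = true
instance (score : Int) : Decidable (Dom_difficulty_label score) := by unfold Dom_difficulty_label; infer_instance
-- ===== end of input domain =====

-- B replaces A's linear scan over threshold triples by a binary search (bisect_right)
-- over a sorted threshold list with a parallel label list; alternative algorithm, same results.


-- ===== PORT A =====
-- the 'for level, threshold, label in score_buckets' loop with its early return
def pvAScan : List (Int × Int × String) → Int → Int × String
  | [], _ => (10, "Rare / Obscure")
  | (level, threshold, label) :: rest, score =>
      if score < threshold then (level, label) else pvAScan rest score

def difficulty_label (score : Int) : Int × String :=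
  pvAScan
    [(1, 10, "Ultra Easy"), (2, 20, "Very Easy"), (3, 30, "Easy"),
     (4, 40, "Lower Medium"), (5, 55, "Medium"), (6, 70, "Upper Medium"),
     (7, 80, "Hard"), (8, 90, "Very Hard"), (9, 100, "Rare / Obscure")]
    score

-- ===== PORT B =====
def pvBThresholds : List Int := [10, 20, 30, 40, 55, 70, 80, 90, 100]
def pvBLabels : List String :=
  ["Ultra Easy", "Very Easy", "Easy", "Lower Medium", "Medium",
   "Upper Medium", "Hard", "Very Hard", "Rare / Obscure"]

-- the 'while lo < hi' binary-search loop of Source B.  The Nat fuel only guards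
-- totality (the interval halves each pass, so fuel 9 is never exhausted);
-- thresholds[mid] is always in range (0 ≤ lo ≤ mid < hi ≤ 9), so the '.getD 0'
-- default is unreachable.
def pvBSearch (score : Int) : Nat → Int → Int → Int
  | 0, lo, _ => lo
  | fuel + 1, lo, hi =>
    if lo < hi then
      let mid := PySem.Int.floordiv (lo + hi) 2
      if score < (PySem.List.pyGet? pvBThresholds mid).getD 0 then
        pvBSearch score fuel lo mid
      else
        pvBSearch score fuel (mid + 1) hi
    else lo

def difficulty_label_alt (score : Int) : Int × String :=
  let i := pvBSearch score 9 0 9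
  -- labels[i] is in range whenever i < 9; the '.getD ""' default is unreachable
  if i < 9 then (i + 1, (PySem.List.pyGet? pvBLabels i).getD "")
  else (10, "Rare / Obscure")

-- ===== PRECONDITION & SPEC =====
def Spec_difficulty_label (score : Int) (out : Int × String) : Prop := out = difficulty_label_alt score
instance (score : Int) (out : Int × String) : Decidable (Spec_difficulty_label score out) := by unfold Spec_difficulty_label; infer_instance

-- ===== CLAIM (what is proved, stated in full; the proofs are below) =====
def Claim_equal_difficulty_label : Prop := ∀ (score : Int), Dom_difficulty_label score → Spec_difficulty_label score (difficulty_label score)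

-- ===== LEMMAS AND PROOFS =====
-- A's scan only compares score with the thresholds in the list, so it cannot
-- distinguish two scores that compare equally with every threshold.
theorem pvAScan_congr (s r : Int) :
    ∀ L : List (Int × Int × String), (∀ x ∈ L, (s < x.2.1 ↔ r < x.2.1)) →
      pvAScan L s = pvAScan L r := by
  intro L
  induction L with
  | nil => intro _; rfl
  | cons x rest ih =>
    intro h
    obtain ⟨level, threshold, label⟩ := x
    have hx := h (level, threshold, label) (by simp)
    simp only [pvAScan]
    by_cases hs : s < threshold
    · rw [if_pos hs, if_pos (hx.mp hs)]
    · rw [if_neg hs, if_neg (fun hr => hs (hx.mpr hr)), ih (fun y hy => h y (by simp [hy]))]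

-- the binary search likewise only compares score with thresholds (or with the
-- unreachable default 0), so it cannot distinguish such scores either
theorem pvBSearch_congr (s r : Int)
    (h : ∀ t ∈ (0 :: pvBThresholds), (s < t ↔ r < t)) :
    ∀ (f : Nat) (lo hi : Int), pvBSearch s f lo hi = pvBSearch r f lo hi := by
  intro f
  induction f with
  | zero => intro lo hi; rfl
  | succ f ih =>
    intro lo hi
    simp only [pvBSearch]
    by_cases hlh : lo < hi
    · rw [if_pos hlh, if_pos hlh]
      have hc : (s < (PySem.List.pyGet? pvBThresholds (PySem.Int.floordiv (lo + hi) 2)).getD 0) ↔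
          (r < (PySem.List.pyGet? pvBThresholds (PySem.Int.floordiv (lo + hi) 2)).getD 0) := by
        cases hg : PySem.List.pyGet? pvBThresholds (PySem.Int.floordiv (lo + hi) 2) with
        | none => simpa using h 0 (by simp)
        | some t =>
          have ht : t ∈ pvBThresholds := PySem.List.mem_of_pyGet?_eq_some _ hg
          simpa using h t (by simp [ht])
      by_cases hs : s < (PySem.List.pyGet? pvBThresholds (PySem.Int.floordiv (lo + hi) 2)).getD 0
      · rw [if_pos hs, if_pos (hc.mp hs), ih]
      · rw [if_neg hs, if_neg (fun hr => hs (hc.mpr hr)), ih]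
    · rw [if_neg hlh, if_neg hlh]

-- ===== VERDICT (by name: the statement is the Claim_ definition above) =====
theorem difficulty_label_spec : Claim_equal_difficulty_label := by
  intro score _
  unfold Spec_difficulty_label difficulty_label difficulty_label_alt
  have H : score < 0 ∨ (0 ≤ score ∧ score < 10) ∨ (10 ≤ score ∧ score < 20) ∨
      (20 ≤ score ∧ score < 30) ∨ (30 ≤ score ∧ score < 40) ∨ (40 ≤ score ∧ score < 55) ∨
      (55 ≤ score ∧ score < 70) ∨ (70 ≤ score ∧ score < 80) ∨ (80 ≤ score ∧ score < 90) ∨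
      (90 ≤ score ∧ score < 100) ∨ 100 ≤ score := by omega
  rcases H with h | h | h | h | h | h | h | h | h | h | h
  · rw [pvAScan_congr score (-1) _ (by intro x hx; fin_cases hx <;> dsimp only <;> omega),
        pvBSearch_congr score (-1) (by intro t ht; fin_cases ht <;> omega)]
    decide
  · rw [pvAScan_congr score 0 _ (by intro x hx; fin_cases hx <;> dsimp only <;> omega),
        pvBSearch_congr score 0 (by intro t ht; fin_cases ht <;> omega)]
    decide
  · rw [pvAScan_congr score 10 _ (by intro x hx; fin_cases hx <;> dsimp only <;> omega),
        pvBSearch_congr score 10 (by intro t ht; fin_cases ht <;> omega)]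
    decide
  · rw [pvAScan_congr score 20 _ (by intro x hx; fin_cases hx <;> dsimp only <;> omega),
        pvBSearch_congr score 20 (by intro t ht; fin_cases ht <;> omega)]
    decide
  · rw [pvAScan_congr score 30 _ (by intro x hx; fin_cases hx <;> dsimp only <;> omega),
        pvBSearch_congr score 30 (by intro t ht; fin_cases ht <;> omega)]
    decide
  · rw [pvAScan_congr score 40 _ (by intro x hx; fin_cases hx <;> dsimp only <;> omega),
        pvBSearch_congr score 40 (by intro t ht; fin_cases ht <;> omega)]
    decide
  · rw [pvAScan_congr score 55 _ (by intro x hx; fin_cases hx <;> dsimp only <;> omega),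
        pvBSearch_congr score 55 (by intro t ht; fin_cases ht <;> omega)]
    decide
  · rw [pvAScan_congr score 70 _ (by intro x hx; fin_cases hx <;> dsimp only <;> omega),
        pvBSearch_congr score 70 (by intro t ht; fin_cases ht <;> omega)]
    decide
  · rw [pvAScan_congr score 80 _ (by intro x hx; fin_cases hx <;> dsimp only <;> omega),
        pvBSearch_congr score 80 (by intro t ht; fin_cases ht <;> omega)]
    decide
  · rw [pvAScan_congr score 90 _ (by intro x hx; fin_cases hx <;> dsimp only <;> omega),
        pvBSearch_congr score 90 (by intro t ht; fin_cases ht <;> omega)]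
    decide
  · rw [pvAScan_congr score 100 _ (by intro x hx; fin_cases hx <;> dsimp only <;> omega),
        pvBSearch_congr score 100 (by intro t ht; fin_cases ht <;> omega)]
    decide
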